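-- pv_equiv track=rewrite | github.com/nekoffski/aoc2025 | 4.py | remove_rolls
-- ===== SOURCE A (Python) =====
-- def neighbours(x, y, xn, yn, grid):
--     out = 0
--     for dx in [-1, 0, 1]:
--         for dy in [-1, 0, 1]:
--             if dx == 0 and dy == 0:
--                 continue
--             nx, ny = x + dx, y + dy
--             if 0 <= nx < xn and 0 <= ny < yn:
--                 if grid[ny][nx] == '@':
--                     out += 1
--     return out
--
-- def remove_rolls(grid):
--     new_grid = [list(row) for row in grid]
--
--     z1 = 0
--     for i in range(len(grid)):
--         row = list(grid[i])
--         for j in range(len(row)):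
--             if row[j] == '@' and neighbours(j, i, len(row), len(grid), grid) < 4:
--                 new_grid[i][j] = 'x'
--                 z1 += 1
--
--     new_grid = [''.join(row) for row in new_grid]
--     return new_grid, z1
-- ===== SOURCE B (Python) =====
-- _OFFS = [(-1, -1), (-1, 0), (-1, 1), (0, -1), (0, 1), (1, -1), (1, 0), (1, 1)]
--
-- def remove_rolls(grid):
--     n = len(grid)
--     counts = [[0] * len(row) for row in grid]
--     for r in range(n):
--         row = grid[r]
--         for c in range(len(row)):
--             if row[c] == '@':
--                 for dr, dc in _OFFS:
--                     tr, tc = r + dr, c + dc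
--                     if 0 <= tr < n and 0 <= tc < len(grid[tr]):
--                         counts[tr][tc] += 1
--     z1 = 0
--     out = []
--     for r in range(n):
--         row = grid[r]
--         chars = []
--         for c in range(len(row)):
--             if row[c] == '@' and counts[r][c] < 4:
--                 chars.append('x')
--                 z1 += 1
--             else:
--                 chars.append(row[c])
--         out.append(''.join(chars))
--     return out, z1
-- ===== Notes on version B (the rewrite author's own statement) =====
-- stated objective: alternative
-- what changed: A recomputes each '@' cell's neighbour count by an 8-direction bounds-checked gather and mutates a copied grid in place; B is two staged passes over a separate integer counts table: a scatter pass where every '@' cell increments its in-bounds neighbours' counters, then a pass that builds the output rows from the table; Pre_ excludes exactly the ragged grids on which A raises IndexError (its probe bounds-check uses the current row's width against other rows).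
import Mathlib
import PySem

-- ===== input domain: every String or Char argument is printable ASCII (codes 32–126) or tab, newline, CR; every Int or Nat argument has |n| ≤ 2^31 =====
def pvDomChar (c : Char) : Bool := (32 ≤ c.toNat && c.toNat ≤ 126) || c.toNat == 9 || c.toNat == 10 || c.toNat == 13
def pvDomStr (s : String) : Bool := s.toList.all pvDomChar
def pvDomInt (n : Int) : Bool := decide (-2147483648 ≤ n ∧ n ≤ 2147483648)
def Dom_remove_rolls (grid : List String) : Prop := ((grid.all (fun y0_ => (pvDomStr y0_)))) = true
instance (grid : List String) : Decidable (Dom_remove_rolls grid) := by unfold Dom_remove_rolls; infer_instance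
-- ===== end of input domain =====

-- B replaces A's per-cell 8-direction gather (recompute the neighbour count at every '@' cell,
-- mutating a copied grid in place) by two staged passes over a separate integer counts table:
-- a scatter pass in which every '@' cell increments its in-bounds neighbours' counters, then a
-- pass that builds the output rows from the table (alternative decomposition, similar cost).

-- ===== PORT A =====
def neighbours (x y xn yn : Int) (grid : List String) : Int :=
  [(-1 : Int), 0, 1].foldl (fun out dx =>
    [(-1 : Int), 0, 1].foldl (fun out dy =>
      if dx = 0 ∧ dy = 0 then out
      else
        let nx := x + dx
        let ny := y + dy
        if 0 ≤ nx ∧ nx < xn ∧ 0 ≤ ny ∧ ny < yn then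
          if ((PySem.List.pyGet? grid ny).bind (fun r => PySem.List.pyGet? r.toList nx)) = some '@'
          then out + 1 else out
        else out) out) 0

def remove_rolls (grid : List String) : List String × Int :=
  let new_grid : List (List Char) := grid.map (fun row => row.toList)
  let st :=
    (PySem.List.pyRange 0 (PySem.List.len grid) 1).foldl (fun (st : List (List Char) × Int) i =>
      let row : List Char := (PySem.List.pyGetD grid i "").toList
      (PySem.List.pyRange 0 (PySem.List.len row) 1).foldl (fun st j =>
        if PySem.List.pyGetD row j ' ' = '@' ∧
            neighbours j i (PySem.List.len row) (PySem.List.len grid) grid < 4 then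
          (PySem.List.pySetD st.1 i (PySem.List.pySetD (PySem.List.pyGetD st.1 i []) j 'x'), st.2 + 1)
        else st) st) (new_grid, 0)
  (st.1.map (fun row => String.ofList row), st.2)   -- ''.join on a list of 1-char strings = String.ofList

-- ===== PORT B =====
-- _OFFS, the 8 neighbour offsets of Source B
def pvOffs : List (Int × Int) := [(-1,-1),(-1,0),(-1,1),(0,-1),(0,1),(1,-1),(1,0),(1,1)]

-- grid[tr] is only consulted when the guard has already established 0 ≤ tr < n (Python's
-- short-circuit `and`), so the total pyGetD with default "" is exact there.
def remove_rolls_alt (grid : List String) : List String × Int :=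
  let n : Int := PySem.List.len grid
  let counts : List (List Int) :=
    (PySem.List.pyRange 0 n 1).foldl (fun cnts r =>
      let row := (PySem.List.pyGetD grid r "").toList
      (PySem.List.pyRange 0 (PySem.List.len row) 1).foldl (fun cnts c =>
        if PySem.List.pyGetD row c ' ' = '@' then
          pvOffs.foldl (fun cnts d =>
            if 0 ≤ r + d.1 ∧ r + d.1 < n ∧ 0 ≤ c + d.2 ∧
                c + d.2 < PySem.List.len (PySem.List.pyGetD grid (r + d.1) "").toList then
              PySem.List.pySetD cnts (r + d.1)
                (PySem.List.pySetD (PySem.List.pyGetD cnts (r + d.1) []) (c + d.2)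
                  (PySem.List.pyGetD (PySem.List.pyGetD cnts (r + d.1) []) (c + d.2) 0 + 1))
            else cnts) cnts
        else cnts) cnts)
      (grid.map (fun row => List.replicate row.toList.length (0 : Int)))
  (PySem.List.pyRange 0 n 1).foldl (fun (st : List String × Int) r =>
    let row := (PySem.List.pyGetD grid r "").toList
    let res :=
      (PySem.List.pyRange 0 (PySem.List.len row) 1).foldl (fun (p : List Char × Int) c =>
        if PySem.List.pyGetD row c ' ' = '@' ∧
            PySem.List.pyGetD (PySem.List.pyGetD counts r []) c 0 < 4 then
          (p.1 ++ ['x'], p.2 + 1)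
        else (p.1 ++ [PySem.List.pyGetD row c ' '], p.2)) (([] : List Char), st.2)
    (st.1 ++ [String.ofList res.1], res.2)) (([] : List String), 0)

-- ===== PRECONDITION & SPEC =====
-- Pre_ excludes exactly the (necessarily non-rectangular) grids on which A raises IndexError:
-- those where some '@' cell's neighbour probe, in bounds for the cell's own row, indexes past the
-- end of an adjacent row. A is total on Pre_, and Pre_ admits every input A returns on.
def Pre_remove_rolls (grid : List String) : Prop :=
  ∀ i ∈ List.range grid.length, ∀ i' ∈ List.range grid.length,
    ∀ j ∈ List.range ((grid.getD i "").toList).length,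
      ∀ j' ∈ List.range ((grid.getD i "").toList).length,
      ((grid.getD i "").toList).getD j ' ' = '@' →
      i' ≤ i + 1 → i ≤ i' + 1 → j' ≤ j + 1 → j ≤ j' + 1 →
        j' < ((grid.getD i' "").toList).length
instance (grid : List String) : Decidable (Pre_remove_rolls grid) := by
  unfold Pre_remove_rolls; infer_instance

def pvWitness_remove_rolls : List String := ["@@.", ".@@", "@.@"]

def Spec_remove_rolls (grid : List String) (out : List String × Int) : Prop := out = remove_rolls_alt grid
instance (grid : List String) (out : List String × Int) : Decidable (Spec_remove_rolls grid out) := by unfold Spec_remove_rolls; infer_instance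

-- ===== CLAIM (what is proved, stated in full; the proofs are below) =====
def Claim_equal_remove_rolls : Prop := ∀ (grid : List String), Dom_remove_rolls grid → Pre_remove_rolls grid → Spec_remove_rolls grid (remove_rolls grid)

-- ===== LEMMAS AND PROOFS =====

-- row i of the grid as chars; out-of-range rows are empty
def pvW (grid : List String) (k : Nat) : List Char := (grid.getD k "").toList

-- 0/1 indicator of an '@' at (row k, column c)
def pvS (grid : List String) (k c : Nat) : Int :=
  if (pvW grid k)[c]? = some '@' then 1 else 0

def pvRowS (grid : List String) (j k : Nat) : Int :=
  (if j = 0 then 0 else pvS grid k (j - 1)) + pvS grid k j + pvS grid k (j + 1)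

def pvBlock (grid : List String) (i j : Nat) : Int :=
  (if i = 0 then 0 else pvRowS grid j (i - 1)) + pvRowS grid j i + pvRowS grid j (i + 1)

-- Int-guarded indicator
def pvSI (grid : List String) (r c : Int) : Int :=
  if 0 ≤ r ∧ 0 ≤ c then pvS grid r.toNat c.toNat else 0

-- per-cell decisions of the two programs
def pvDecA (grid : List String) (i j : Nat) : Bool :=
  decide ((pvW grid i).getD j ' ' = '@' ∧
    neighbours (j : Int) (i : Int) ((pvW grid i).length : Int) (grid.length : Int) grid < 4)

def pvDecB (grid : List String) (i j : Nat) : Bool :=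
  decide ((pvW grid i).getD j ' ' = '@' ∧ pvBlock grid i j - 1 < 4)

-- common reference output
def pvRowRef (grid : List String) (dec : Nat → Nat → Bool) (i : Nat) : List Char :=
  (List.range (pvW grid i).length).map (fun j => if dec i j then 'x' else (pvW grid i).getD j ' ')

def pvCnt (grid : List String) (dec : Nat → Nat → Bool) (i : Nat) : Int :=
  ((List.range (pvW grid i).length).countP (dec i) : Int)

def pvRef (grid : List String) (dec : Nat → Nat → Bool) : List String × Int :=
  ((List.range grid.length).map (fun i => String.ofList (pvRowRef grid dec i)),
   ((List.range grid.length).map (pvCnt grid dec)).sum)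

-- unpacking Pre_
lemma pv_safe {grid : List String} (hpre : Pre_remove_rolls grid) {i j i' j' : Nat}
    (hi : i < grid.length) (hi' : i' < grid.length)
    (hat : (pvW grid i)[j]? = some '@')
    (h1 : i' ≤ i + 1) (h2 : i ≤ i' + 1) (h3 : j' ≤ j + 1) (h4 : j ≤ j' + 1)
    (hj' : j' < (pvW grid i).length) : j' < (pvW grid i').length := by
  have hj : j < (pvW grid i).length := (List.getElem?_eq_some_iff.mp hat).1
  have hat' : (pvW grid i).getD j ' ' = '@' := by
    rw [List.getD_eq_getElem?_getD, hat]; rfl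
  exact hpre i (List.mem_range.mpr hi) i' (List.mem_range.mpr hi') j (List.mem_range.mpr hj)
    j' (List.mem_range.mpr hj') hat' h1 h2 h3 h4

-- no '@' just past the right edge of an adjacent row (else A would have crashed)
lemma pv_phantom {grid : List String} (hpre : Pre_remove_rolls grid) {i j i' : Nat}
    (hi : i < grid.length) (hi' : i' < grid.length) (h1 : i' ≤ i + 1) (h2 : i ≤ i' + 1)
    (hw : (pvW grid i).length = j + 1) : pvS grid i' (j + 1) = 0 := by
  unfold pvS
  split_ifs with hat
  · exfalso
    have hj1 : j + 1 < (pvW grid i').length := (List.getElem?_eq_some_iff.mp hat).1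
    have := pv_safe hpre hi' hi hat h2 h1 (Nat.le_succ _) (Nat.le_succ _) hj1
    omega
  · rfl

-- one probe term of A's neighbour loop
lemma pv_term {grid : List String} (hpre : Pre_remove_rolls grid) {i j : Nat}
    (hi : i < grid.length) (hat : (pvW grid i)[j]? = some '@')
    (dx dy : Int) (hdx1 : -1 ≤ dx) (hdx2 : dx ≤ 1) (hdy1 : -1 ≤ dy) (hdy2 : dy ≤ 1) (acc : Int) :
    (if 0 ≤ (j : Int) + dx ∧ (j : Int) + dx < ((pvW grid i).length : Int) ∧
        0 ≤ (i : Int) + dy ∧ (i : Int) + dy < (grid.length : Int) then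
       if ((PySem.List.pyGet? grid ((i : Int) + dy)).bind
             (fun r => PySem.List.pyGet? r.toList ((j : Int) + dx))) = some '@'
       then acc + 1 else acc
     else acc) = acc + pvSI grid ((i : Int) + dy) ((j : Int) + dx) := by
  have hjlt : j < (pvW grid i).length := (List.getElem?_eq_some_iff.mp hat).1
  by_cases hb : 0 ≤ (j : Int) + dx ∧ (j : Int) + dx < ((pvW grid i).length : Int) ∧
      0 ≤ (i : Int) + dy ∧ (i : Int) + dy < (grid.length : Int)
  · obtain ⟨hb1, hb2, hb3, hb4⟩ := hb
    set i' := ((i:Int)+dy).toNat with hidef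
    set j' := ((j:Int)+dx).toNat with hjdef
    have hi'lt : i' < grid.length := by omega
    have hj'lt : j' < (pvW grid i).length := by omega
    have hsafe : j' < (pvW grid i').length :=
      pv_safe hpre hi hi'lt hat (by omega) (by omega) (by omega) (by omega) hj'lt
    have hrow : grid[i'].toList = pvW grid i' := by
      unfold pvW; rw [List.getD_eq_getElem?_getD, List.getElem?_eq_getElem hi'lt]; rfl
    have hkey : ((PySem.List.pyGet? grid ((i : Int) + dy)).bind
             (fun r => PySem.List.pyGet? r.toList ((j : Int) + dx))) = (pvW grid i')[j']? := by
      rw [show ((i:Int)+dy) = (i' : Int) by omega, show ((j:Int)+dx) = (j' : Int) by omega]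
      simp only [PySem.List.pyGet?_natCast, List.getElem?_eq_getElem hi'lt,
        Option.bind_some, hrow]
    rw [if_pos ⟨hb1, hb2, hb3, hb4⟩, hkey]
    have hSI : pvSI grid ((i:Int)+dy) ((j:Int)+dx) = pvS grid i' j' := by
      unfold pvSI; rw [if_pos ⟨hb3, hb1⟩]
    rw [hSI]
    unfold pvS
    split_ifs <;> omega
  · rw [if_neg hb]
    have hz : pvSI grid ((i:Int)+dy) ((j:Int)+dx) = 0 := by
      unfold pvSI
      split_ifs with hg
      · obtain ⟨hg1, hg2⟩ := hg
        by_cases hrow : (i:Int)+dy < (grid.length:Int)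
        · have hw : (pvW grid i).length = j + 1 := by
            rcases (Decidable.not_and_iff_not_or_not.mp hb) with h | h
            · omega
            rcases (Decidable.not_and_iff_not_or_not.mp h) with h' | h'
            · omega
            rcases (Decidable.not_and_iff_not_or_not.mp h') with h'' | h''
            · omega
            · omega
          have hx : ((j:Int)+dx).toNat = j + 1 := by
            rcases (Decidable.not_and_iff_not_or_not.mp hb) with h | h
            · omega
            rcases (Decidable.not_and_iff_not_or_not.mp h) with h' | h'
            · omega
            rcases (Decidable.not_and_iff_not_or_not.mp h') with h'' | h''
            · omega
            · omega
          have hy : ((i:Int)+dy).toNat < grid.length := by omega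
          rw [hx]
          exact pv_phantom hpre hi hy (by omega) (by omega) hw
        · have hge : grid.length ≤ ((i:Int)+dy).toNat := by omega
          unfold pvS
          rw [show pvW grid ((i:Int)+dy).toNat = [] from by
            unfold pvW; rw [List.getD_eq_default _ _ hge]; rfl]
          simp
      · rfl
    omega

lemma pvSI_neg_left (grid : List String) (r c : Int) (h : r < 0) : pvSI grid r c = 0 := by
  unfold pvSI; rw [if_neg]; rintro ⟨h1, _⟩; omega

lemma pvSI_neg_right (grid : List String) (r c : Int) (h : c < 0) : pvSI grid r c = 0 := by
  unfold pvSI; rw [if_neg]; rintro ⟨_, h2⟩; omega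

lemma pvSI_of (grid : List String) (a b : Nat) (r c : Int) (hr : r = (a : Int)) (hc : c = (b : Int)) :
    pvSI grid r c = pvS grid a b := by
  subst hr; subst hc; simp [pvSI]

-- the heart of the A-side: A's neighbour count is the 3x3 block count minus the cell itself
lemma pv_nb {grid : List String} (hpre : Pre_remove_rolls grid) {i j : Nat}
    (hi : i < grid.length) (hat : (pvW grid i)[j]? = some '@') :
    neighbours (j : Int) (i : Int) ((pvW grid i).length : Int) (grid.length : Int) grid =
      pvBlock grid i j - 1 := by
  have hmain : neighbours (j : Int) (i : Int) ((pvW grid i).length : Int) (grid.length : Int) grid =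
      [(-1:Int),0,1].foldl (fun out dx => [(-1:Int),0,1].foldl (fun out dy =>
        if dx = 0 ∧ dy = 0 then out
        else out + pvSI grid ((i:Int)+dy) ((j:Int)+dx)) out) 0 := by
    unfold neighbours
    apply PySem.List.foldl_congr_mem
    intro acc dx hdx
    apply PySem.List.foldl_congr_mem
    intro acc' dy hdy
    have hdx' : -1 ≤ dx ∧ dx ≤ 1 := by
      simp only [List.mem_cons, List.not_mem_nil, or_false] at hdx
      rcases hdx with rfl | rfl | rfl <;> norm_num
    have hdy' : -1 ≤ dy ∧ dy ≤ 1 := by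
      simp only [List.mem_cons, List.not_mem_nil, or_false] at hdy
      rcases hdy with rfl | rfl | rfl <;> norm_num
    by_cases hdd : dx = 0 ∧ dy = 0
    · rw [if_pos hdd, if_pos hdd]
    · rw [if_neg hdd, if_neg hdd]
      exact pv_term hpre hi hat dx dy hdx'.1 hdx'.2 hdy'.1 hdy'.2 acc'
  rw [hmain]
  simp only [List.foldl_cons, List.foldl_nil]
  norm_num
  have hc : pvS grid i j = 1 := by simp [pvS, hat]
  by_cases hi0 : i = 0 <;> by_cases hj0 : j = 0
  · subst hi0
    subst hj0
    rw [pvSI_neg_left grid (((0:ℕ) : Int) + (-1)) (((0:ℕ) : Int) + (-1)) (by omega)]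
    rw [pvSI_neg_right grid (((0:ℕ) : Int)) (((0:ℕ) : Int) + (-1)) (by omega)]
    rw [pvSI_neg_right grid (((0:ℕ) : Int) + 1) (((0:ℕ) : Int) + (-1)) (by omega)]
    rw [pvSI_neg_left grid (((0:ℕ) : Int) + (-1)) (((0:ℕ) : Int)) (by omega)]
    rw [pvSI_of grid (1:ℕ) (0:ℕ) (((0:ℕ) : Int) + 1) (((0:ℕ) : Int)) (by omega) (by omega)]
    rw [pvSI_neg_left grid (((0:ℕ) : Int) + (-1)) (((0:ℕ) : Int) + 1) (by omega)]
    rw [pvSI_of grid (0:ℕ) (1:ℕ) (((0:ℕ) : Int)) (((0:ℕ) : Int) + 1) (by omega) (by omega)]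
    rw [pvSI_of grid (1:ℕ) (1:ℕ) (((0:ℕ) : Int) + 1) (((0:ℕ) : Int) + 1) (by omega) (by omega)]
    simp [pvBlock, pvRowS, hc]
    ring
  · subst hi0
    rw [pvSI_neg_left grid (((0:ℕ) : Int) + (-1)) ((j : Int) + (-1)) (by omega)]
    rw [pvSI_of grid (0:ℕ) (j - 1) (((0:ℕ) : Int)) ((j : Int) + (-1)) (by omega) (by omega)]
    rw [pvSI_of grid (1:ℕ) (j - 1) (((0:ℕ) : Int) + 1) ((j : Int) + (-1)) (by omega) (by omega)]
    rw [pvSI_neg_left grid (((0:ℕ) : Int) + (-1)) ((j : Int)) (by omega)]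
    rw [pvSI_of grid (1:ℕ) j (((0:ℕ) : Int) + 1) ((j : Int)) (by omega) (by omega)]
    rw [pvSI_neg_left grid (((0:ℕ) : Int) + (-1)) ((j : Int) + 1) (by omega)]
    rw [pvSI_of grid (0:ℕ) (j + 1) (((0:ℕ) : Int)) ((j : Int) + 1) (by omega) (by omega)]
    rw [pvSI_of grid (1:ℕ) (j + 1) (((0:ℕ) : Int) + 1) ((j : Int) + 1) (by omega) (by omega)]
    simp [pvBlock, pvRowS, hc, hj0]
    ring
  · subst hj0
    rw [pvSI_neg_right grid ((i : Int) + (-1)) (((0:ℕ) : Int) + (-1)) (by omega)]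
    rw [pvSI_neg_right grid ((i : Int)) (((0:ℕ) : Int) + (-1)) (by omega)]
    rw [pvSI_neg_right grid ((i : Int) + 1) (((0:ℕ) : Int) + (-1)) (by omega)]
    rw [pvSI_of grid (i - 1) (0:ℕ) ((i : Int) + (-1)) (((0:ℕ) : Int)) (by omega) (by omega)]
    rw [pvSI_of grid (i + 1) (0:ℕ) ((i : Int) + 1) (((0:ℕ) : Int)) (by omega) (by omega)]
    rw [pvSI_of grid (i - 1) (1:ℕ) ((i : Int) + (-1)) (((0:ℕ) : Int) + 1) (by omega) (by omega)]
    rw [pvSI_of grid i (1:ℕ) ((i : Int)) (((0:ℕ) : Int) + 1) (by omega) (by omega)]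
    rw [pvSI_of grid (i + 1) (1:ℕ) ((i : Int) + 1) (((0:ℕ) : Int) + 1) (by omega) (by omega)]
    simp [pvBlock, pvRowS, hc, hi0]
    ring
  · rw [pvSI_of grid (i - 1) (j - 1) ((i : Int) + (-1)) ((j : Int) + (-1)) (by omega) (by omega)]
    rw [pvSI_of grid i (j - 1) ((i : Int)) ((j : Int) + (-1)) (by omega) (by omega)]
    rw [pvSI_of grid (i + 1) (j - 1) ((i : Int) + 1) ((j : Int) + (-1)) (by omega) (by omega)]
    rw [pvSI_of grid (i - 1) j ((i : Int) + (-1)) ((j : Int)) (by omega) (by omega)]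
    rw [pvSI_of grid (i + 1) j ((i : Int) + 1) ((j : Int)) (by omega) (by omega)]
    rw [pvSI_of grid (i - 1) (j + 1) ((i : Int) + (-1)) ((j : Int) + 1) (by omega) (by omega)]
    rw [pvSI_of grid i (j + 1) ((i : Int)) ((j : Int) + 1) (by omega) (by omega)]
    rw [pvSI_of grid (i + 1) (j + 1) ((i : Int) + 1) ((j : Int) + 1) (by omega) (by omega)]
    simp [pvBlock, pvRowS, hc, hi0, hj0]
    ring

-- the two decisions agree under Pre_
lemma pv_dec_eq {grid : List String} (hpre : Pre_remove_rolls grid) {i j : Nat}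
    (hi : i < grid.length) (hj : j < (pvW grid i).length) :
    pvDecA grid i j = pvDecB grid i j := by
  unfold pvDecA pvDecB
  rw [decide_eq_decide]
  by_cases hat : (pvW grid i).getD j ' ' = '@'
  · have hat' : (pvW grid i)[j]? = some '@' := by
      rw [List.getElem?_eq_getElem hj]
      rw [List.getD_eq_getElem?_getD, List.getElem?_eq_getElem hj] at hat
      simpa using hat
    rw [pv_nb hpre hi hat']
  · constructor <;> rintro ⟨ha, hb⟩ <;> exact absurd ha hat

-- ===== port A equals the reference =====

-- partially marked row i: cells below b already decided
def pvHyb (grid : List String) (i b : Nat) : List Char :=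
  (List.range (pvW grid i).length).map
    (fun k => if k < b ∧ pvDecA grid i k = true then 'x' else (pvW grid i).getD k ' ')

lemma pvHyb_zero (grid : List String) (i : Nat) : pvHyb grid i 0 = pvW grid i := by
  apply List.ext_getElem (by simp [pvHyb])
  intro k h1 h2
  simp [pvHyb, List.getD_eq_getElem?_getD, List.getElem?_eq_getElem h2]

lemma pvHyb_full (grid : List String) (i : Nat) :
    pvHyb grid i (pvW grid i).length = pvRowRef grid (pvDecA grid) i := by
  unfold pvHyb pvRowRef
  apply List.map_congr_left
  intro k hk
  simp only [List.mem_range] at hk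
  simp [hk]

lemma pvHyb_step_pos (grid : List String) (i b : Nat) (hb : b < (pvW grid i).length)
    (hdec : pvDecA grid i b = true) :
    (pvHyb grid i b).set b 'x' = pvHyb grid i (b + 1) := by
  apply List.ext_getElem (by simp [pvHyb])
  intro k h1 h2
  simp only [pvHyb, List.getElem_set, List.getElem_map, List.getElem_range]
  by_cases hkb : b = k
  · subst hkb
    simp [hdec, Nat.lt_succ_self]
  · rw [if_neg hkb]
    by_cases hlt : k < b
    · simp [hlt, show k < b + 1 by omega]
    · simp [hlt, show ¬ (k < b + 1) by omega]

lemma pvHyb_step_neg (grid : List String) (i b : Nat)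
    (hdec : pvDecA grid i b = false) :
    pvHyb grid i b = pvHyb grid i (b + 1) := by
  unfold pvHyb
  apply List.map_congr_left
  intro k hk
  by_cases hkb : k = b
  · subst hkb; simp [hdec]
  · have h1 : (k < b ∧ pvDecA grid i k = true) ↔ (k < b + 1 ∧ pvDecA grid i k = true) := by
      constructor
      · rintro ⟨h, hd⟩; exact ⟨by omega, hd⟩
      · rintro ⟨h, hd⟩; exact ⟨by omega, hd⟩
    simp only [h1]

lemma pv_innerA (grid : List String) (i : Nat) (hi : i < grid.length) :
    ∀ (m b : Nat), b + m = (pvW grid i).length →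
    ∀ (cur : List Char), cur = pvHyb grid i b →
    ∀ (pre suf : List (List Char)) (z : Int), pre.length = i →
    (PySem.List.pyRange (b : Int) ((pvW grid i).length : Int) 1).foldl
      (fun st j =>
        if PySem.List.pyGetD (pvW grid i) j ' ' = '@' ∧
            neighbours j (i : Int) (((pvW grid i).length : Int)) ((grid.length : Int)) grid < 4 then
          (PySem.List.pySetD st.1 (i : Int) (PySem.List.pySetD (PySem.List.pyGetD st.1 (i : Int) []) j 'x'), st.2 + 1)
        else st) (pre ++ cur :: suf, z)
    = (pre ++ pvHyb grid i (pvW grid i).length :: suf,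
       z + ((List.range' b m).countP (pvDecA grid i) : Int)) := by
  intro m
  induction m with
  | zero =>
    intro b hb cur hcur pre suf z hpre
    subst hcur
    rw [PySem.List.pyRange_one_eq_nil (by omega)]
    simp [show b = (pvW grid i).length by omega]
  | succ m ih =>
    intro b hb cur hcur pre suf z hpre
    subst hcur
    have hblt : b < (pvW grid i).length := by omega
    rw [PySem.List.pyRange_one_cons (by exact_mod_cast hblt), List.foldl_cons]
    have hget : PySem.List.pyGetD (pre ++ pvHyb grid i b :: suf) (i : Int) [] = pvHyb grid i b := by
      rw [PySem.List.pyGetD_natCast, ← hpre]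
      rw [List.getD_eq_getElem?_getD, List.getElem?_append_right (le_refl _)]
      simp
    have hset : PySem.List.pySetD (pre ++ pvHyb grid i b :: suf) (i : Int)
        ((pvHyb grid i b).set b 'x') = pre ++ (pvHyb grid i b).set b 'x' :: suf := by
      rw [PySem.List.pySetD_natCast, ← hpre, List.set_append_right _ _ (le_refl _)]
      simp
    have hrow : PySem.List.pyGetD (pvW grid i) (b : Int) ' ' = (pvW grid i).getD b ' ' := by
      rw [PySem.List.pyGetD_natCast]
    by_cases hc : (pvW grid i).getD b ' ' = '@' ∧
        neighbours (b : Int) (i : Int) (((pvW grid i).length : Int)) ((grid.length : Int)) grid < 4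
    · have hdec : pvDecA grid i b = true := by
        unfold pvDecA; exact decide_eq_true hc
      rw [if_pos (by rw [hrow]; exact hc)]
      rw [hget]
      rw [show PySem.List.pySetD (pvHyb grid i b) (b : Int) 'x' = (pvHyb grid i b).set b 'x'
        from PySem.List.pySetD_natCast _ _ _]
      rw [hset]
      rw [pvHyb_step_pos grid i b hblt hdec]
      rw [show ((b : Int) + 1) = ((b + 1 : Nat) : Int) by push_cast; ring]
      rw [ih (b + 1) (by omega) _ rfl pre suf (z + 1) hpre]
      rw [List.range'_succ, List.countP_cons]
      simp [hdec]
      push_cast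
      ring
    · have hdec : pvDecA grid i b = false := by
        unfold pvDecA; exact decide_eq_false hc
      rw [if_neg (by rw [hrow]; exact hc)]
      rw [pvHyb_step_neg grid i b hdec]
      rw [show ((b : Int) + 1) = ((b + 1 : Nat) : Int) by push_cast; ring]
      rw [ih (b + 1) (by omega) _ rfl pre suf z hpre]
      rw [List.range'_succ, List.countP_cons]
      simp [hdec]

lemma pv_innerA_zero (grid : List String) (i : Nat) (hi : i < grid.length)
    (pre suf : List (List Char)) (z : Int) (hpre : pre.length = i) :
    (PySem.List.pyRange 0 (PySem.List.len (pvW grid i)) 1).foldl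
      (fun st j =>
        if PySem.List.pyGetD (pvW grid i) j ' ' = '@' ∧
            neighbours j (i : Int) (PySem.List.len (pvW grid i)) (PySem.List.len grid) grid < 4 then
          (PySem.List.pySetD st.1 (i : Int) (PySem.List.pySetD (PySem.List.pyGetD st.1 (i : Int) []) j 'x'), st.2 + 1)
        else st) (pre ++ pvW grid i :: suf, z)
    = (pre ++ pvRowRef grid (pvDecA grid) i :: suf, z + pvCnt grid (pvDecA grid) i) := by
  rw [PySem.List.len_eq (pvW grid i), PySem.List.len_eq grid]
  rw [show ((0 : Int)) = (((0 : Nat) : Int)) from rfl]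
  rw [pv_innerA grid i hi (pvW grid i).length 0 (by omega)
    (pvW grid i) (pvHyb_zero grid i).symm pre suf z hpre]
  rw [pvHyb_full grid i]
  rw [show pvCnt grid (pvDecA grid) i
      = ((List.countP (pvDecA grid i) (List.range' 0 (pvW grid i).length) : Nat) : Int) from by
    unfold pvCnt; rw [← List.range_eq_range']]

lemma pvW_lt (grid : List String) (a : Nat) (ha : a < grid.length) :
    (grid.map (fun r => r.toList))[a]'(by simpa using ha) = pvW grid a := by
  simp [pvW, List.getD_eq_getElem?_getD, List.getElem?_eq_getElem ha]

lemma pv_outerA (grid : List String) :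
    ∀ (m a : Nat), a + m = grid.length →
    ∀ (pre : List (List Char)) (z : Int), pre.length = a →
    (PySem.List.pyRange (a : Int) (PySem.List.len grid) 1).foldl
      (fun (st : List (List Char) × Int) i =>
        (PySem.List.pyRange 0 (PySem.List.len ((PySem.List.pyGetD grid i "").toList)) 1).foldl
          (fun st j =>
            if PySem.List.pyGetD ((PySem.List.pyGetD grid i "").toList) j ' ' = '@' ∧
                neighbours j i (PySem.List.len ((PySem.List.pyGetD grid i "").toList)) (PySem.List.len grid) grid < 4 then
              (PySem.List.pySetD st.1 i (PySem.List.pySetD (PySem.List.pyGetD st.1 i []) j 'x'), st.2 + 1)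
            else st) st)
      (pre ++ (grid.map (fun r => r.toList)).drop a, z)
    = (pre ++ (List.range' a m).map (fun k => pvRowRef grid (pvDecA grid) k),
       z + ((List.range' a m).map (pvCnt grid (pvDecA grid))).sum) := by
  intro m
  induction m with
  | zero =>
    intro a ha pre z hpre
    rw [PySem.List.pyRange_one_eq_nil (by simp [PySem.List.len_eq]; omega)]
    rw [List.drop_eq_nil_of_le (by simpa using Nat.le_of_eq ha.symm)]
    simp
  | succ m ih =>
    intro a ha pre z hpre
    have halt : a < grid.length := by omega
    rw [PySem.List.pyRange_one_cons (by simp [PySem.List.len_eq]; exact_mod_cast halt), List.foldl_cons]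
    rw [List.drop_eq_getElem_cons (by simpa using halt)]
    rw [pvW_lt grid a halt]
    have hrw : (PySem.List.pyGetD grid ((a : Nat) : Int) "").toList = pvW grid a := by
      rw [PySem.List.pyGetD_natCast]; rfl
    simp only [hrw]
    rw [pv_innerA_zero grid a halt pre ((grid.map (fun r => r.toList)).drop (a+1)) z hpre]
    rw [show pre ++ pvRowRef grid (pvDecA grid) a :: (grid.map (fun r => r.toList)).drop (a+1)
        = (pre ++ [pvRowRef grid (pvDecA grid) a]) ++ (grid.map (fun r => r.toList)).drop (a+1) from by simp]
    rw [show ((a : Int) + 1) = (((a + 1 : Nat)) : Int) by push_cast; ring]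
    rw [ih (a + 1) (by omega) (pre ++ [pvRowRef grid (pvDecA grid) a]) _ (by simp [hpre])]
    rw [List.range'_succ]
    simp only [List.map_cons, List.sum_cons]
    simp only [Prod.mk.injEq]
    constructor
    · simp
    · ring

theorem pvA_eq (grid : List String) :
    remove_rolls grid = pvRef grid (pvDecA grid) := by
  simp only [remove_rolls]
  rw [show (PySem.List.pyRange 0 (PySem.List.len grid) 1)
      = PySem.List.pyRange (((0 : Nat) : Int)) (PySem.List.len grid) 1 from rfl]
  rw [show grid.map (fun row => row.toList)
      = [] ++ (grid.map (fun r => r.toList)).drop 0 from by simp]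
  rw [pv_outerA grid grid.length 0 (by omega) [] 0 rfl]
  unfold pvRef
  simp [List.range_eq_range', List.map_map]

-- ===== port B equals the reference =====

-- entry (i, j) of the counts table and the shape invariant of the scatter pass
def pvGetE (cnts : List (List Int)) (i j : Nat) : Int := (cnts.getD i []).getD j 0

def pvShape (grid : List String) (cnts : List (List Int)) : Prop :=
  cnts.length = grid.length ∧ ∀ k : Nat, (cnts.getD k []).length = (pvW grid k).length

-- contribution of one source cell (r, c) to target entry (i, j): the 8-offset indicator sum
def pvNb8 (rr cc : Int) (i j : Nat) : Int :=
  (pvOffs.map (fun d => if rr + d.1 = (i : Int) ∧ cc + d.2 = (j : Int) then (1 : Int) else 0)).sum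

def pvCell (grid : List String) (r c i j : Nat) : Int := pvS grid r c * pvNb8 (r : Int) (c : Int) i j

def pvRowC (grid : List String) (r i j : Nat) : Int :=
  ((List.range (pvW grid r).length).map (fun c => pvCell grid r c i j)).sum

def pvTot (grid : List String) (i j : Nat) : Int :=
  ((List.range grid.length).map (fun r => pvRowC grid r i j)).sum

-- one bump of the scatter loop: shape preserved, entries additive
lemma pv_bump (grid : List String) (cnts : List (List Int)) (hs : pvShape grid cnts) (t1 t2 : Int) :
    pvShape grid
      (if 0 ≤ t1 ∧ t1 < PySem.List.len grid ∧ 0 ≤ t2 ∧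
          t2 < PySem.List.len (PySem.List.pyGetD grid t1 "").toList then
        PySem.List.pySetD cnts t1
          (PySem.List.pySetD (PySem.List.pyGetD cnts t1 []) t2
            (PySem.List.pyGetD (PySem.List.pyGetD cnts t1 []) t2 0 + 1))
      else cnts) ∧
    ∀ i j : Nat, i < grid.length → j < (pvW grid i).length →
      pvGetE
        (if 0 ≤ t1 ∧ t1 < PySem.List.len grid ∧ 0 ≤ t2 ∧
            t2 < PySem.List.len (PySem.List.pyGetD grid t1 "").toList then
          PySem.List.pySetD cnts t1
            (PySem.List.pySetD (PySem.List.pyGetD cnts t1 []) t2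
              (PySem.List.pyGetD (PySem.List.pyGetD cnts t1 []) t2 0 + 1))
        else cnts) i j
      = pvGetE cnts i j + (if t1 = (i : Int) ∧ t2 = (j : Int) then 1 else 0) := by
  by_cases hgp : 0 ≤ t1 ∧ t1 < PySem.List.len grid ∧ 0 ≤ t2 ∧
      t2 < PySem.List.len (PySem.List.pyGetD grid t1 "").toList
  · obtain ⟨hg1, hg2, hg3, hg4⟩ := hgp
    rw [PySem.List.len_eq] at hg2
    have ht1 : t1 = ((t1.toNat : Nat) : Int) := by omega
    have halt : t1.toNat < grid.length := by omega
    have hrow : (PySem.List.pyGetD grid t1 "").toList = pvW grid t1.toNat := by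
      rw [ht1, PySem.List.pyGetD_natCast]; rfl
    rw [hrow, PySem.List.len_eq] at hg4
    have ht2 : t2 = ((t2.toNat : Nat) : Int) := by omega
    have hblt : t2.toNat < (pvW grid t1.toNat).length := by omega
    have hguard : 0 ≤ t1 ∧ t1 < PySem.List.len grid ∧ 0 ≤ t2 ∧
        t2 < PySem.List.len (PySem.List.pyGetD grid t1 "").toList := by
      refine ⟨hg1, by rw [PySem.List.len_eq]; omega, hg3, by rw [hrow, PySem.List.len_eq]; omega⟩
    have hsetform : (if 0 ≤ t1 ∧ t1 < PySem.List.len grid ∧ 0 ≤ t2 ∧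
            t2 < PySem.List.len (PySem.List.pyGetD grid t1 "").toList then
          PySem.List.pySetD cnts t1
            (PySem.List.pySetD (PySem.List.pyGetD cnts t1 []) t2
              (PySem.List.pyGetD (PySem.List.pyGetD cnts t1 []) t2 0 + 1))
        else cnts)
        = cnts.set t1.toNat ((cnts.getD t1.toNat []).set t2.toNat
            ((cnts.getD t1.toNat []).getD t2.toNat 0 + 1)) := by
      rw [if_pos hguard, ht1, ht2]
      simp only [PySem.List.pySetD_natCast, PySem.List.pyGetD_natCast, Int.toNat_natCast]
    rw [hsetform]
    have hlen : t1.toNat < cnts.length := by rw [hs.1]; exact halt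
    have hrowlen : t2.toNat < (cnts.getD t1.toNat []).length := by
      rw [hs.2 t1.toNat]; exact hblt
    have hgetset : ∀ (k : Nat) (v : List Int),
        ((cnts.set t1.toNat v).getD k []) = if t1.toNat = k then v else cnts.getD k [] := by
      intro k v
      rw [List.getD_eq_getElem?_getD, List.getElem?_set]
      split_ifs with hk
      · rfl
      · rw [List.getD_eq_getElem?_getD]
    constructor
    · constructor
      · rw [List.length_set]; exact hs.1
      · intro k
        rw [hgetset]
        split_ifs with hk
        · subst hk; rw [List.length_set]; exact hs.2 _
        · exact hs.2 k
    · intro i j hi hj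
      unfold pvGetE
      rw [hgetset]
      by_cases hia : t1.toNat = i
      · subst hia
        rw [if_pos rfl]
        rw [List.getD_eq_getElem?_getD, List.getElem?_set]
        by_cases hjb : t2.toNat = j
        · subst hjb
          rw [if_pos rfl, if_pos hrowlen, if_pos (by omega)]
          simp [List.getD_eq_getElem?_getD]
        · rw [if_neg hjb, if_neg (by omega)]
          rw [← List.getD_eq_getElem?_getD]
          ring
      · rw [if_neg hia, if_neg (by omega)]
        ring
  · rw [if_neg hgp]
    refine ⟨hs, ?_⟩
    intro i j hi hj
    rw [if_neg, add_zero]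
    rintro ⟨he1, he2⟩
    apply hgp
    refine ⟨by omega, ?_, by omega, ?_⟩
    · rw [PySem.List.len_eq]; omega
    · rw [he1, PySem.List.pyGetD_natCast]
      rw [show (grid.getD i "").toList = pvW grid i from rfl, PySem.List.len_eq]
      omega

-- folding the 8 offsets from a fixed source
lemma pv_offs_fold (grid : List String) (rr cc : Int) :
    ∀ (ds : List (Int × Int)) (cnts : List (List Int)), pvShape grid cnts →
    pvShape grid (ds.foldl (fun cnts d =>
        if 0 ≤ rr + d.1 ∧ rr + d.1 < PySem.List.len grid ∧ 0 ≤ cc + d.2 ∧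
            cc + d.2 < PySem.List.len (PySem.List.pyGetD grid (rr + d.1) "").toList then
          PySem.List.pySetD cnts (rr + d.1)
            (PySem.List.pySetD (PySem.List.pyGetD cnts (rr + d.1) []) (cc + d.2)
              (PySem.List.pyGetD (PySem.List.pyGetD cnts (rr + d.1) []) (cc + d.2) 0 + 1))
        else cnts) cnts) ∧
    ∀ i j : Nat, i < grid.length → j < (pvW grid i).length →
      pvGetE (ds.foldl (fun cnts d =>
        if 0 ≤ rr + d.1 ∧ rr + d.1 < PySem.List.len grid ∧ 0 ≤ cc + d.2 ∧
            cc + d.2 < PySem.List.len (PySem.List.pyGetD grid (rr + d.1) "").toList then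
          PySem.List.pySetD cnts (rr + d.1)
            (PySem.List.pySetD (PySem.List.pyGetD cnts (rr + d.1) []) (cc + d.2)
              (PySem.List.pyGetD (PySem.List.pyGetD cnts (rr + d.1) []) (cc + d.2) 0 + 1))
        else cnts) cnts) i j
      = pvGetE cnts i j
        + (ds.map (fun d => if rr + d.1 = (i : Int) ∧ cc + d.2 = (j : Int) then (1:Int) else 0)).sum := by
  intro ds
  induction ds with
  | nil => intro cnts hs; exact ⟨hs, fun i j _ _ => by simp⟩
  | cons d t ih =>
    intro cnts hs
    obtain ⟨hs', hent⟩ := pv_bump grid cnts hs (rr + d.1) (cc + d.2)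
    obtain ⟨hsT, hentT⟩ := ih _ hs'
    refine ⟨by simpa using hsT, ?_⟩
    intro i j hi hj
    rw [List.foldl_cons]
    rw [hentT i j hi hj, hent i j hi hj]
    simp only [List.map_cons, List.sum_cons]
    ring

-- the scatter pass over one source row
lemma pv_scatter_row (grid : List String) (r : Nat) (hr : r < grid.length) :
    ∀ (m b : Nat), b + m = (pvW grid r).length →
    ∀ (cnts : List (List Int)), pvShape grid cnts →
    pvShape grid ((PySem.List.pyRange (b : Int) ((pvW grid r).length : Int) 1).foldl (fun cnts c =>
        if PySem.List.pyGetD (pvW grid r) c ' ' = '@' then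
          pvOffs.foldl (fun cnts d =>
            if 0 ≤ (r : Int) + d.1 ∧ (r : Int) + d.1 < PySem.List.len grid ∧ 0 ≤ c + d.2 ∧
                c + d.2 < PySem.List.len (PySem.List.pyGetD grid ((r : Int) + d.1) "").toList then
              PySem.List.pySetD cnts ((r : Int) + d.1)
                (PySem.List.pySetD (PySem.List.pyGetD cnts ((r : Int) + d.1) []) (c + d.2)
                  (PySem.List.pyGetD (PySem.List.pyGetD cnts ((r : Int) + d.1) []) (c + d.2) 0 + 1))
            else cnts) cnts
        else cnts) cnts) ∧
    ∀ i j : Nat, i < grid.length → j < (pvW grid i).length →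
      pvGetE ((PySem.List.pyRange (b : Int) ((pvW grid r).length : Int) 1).foldl (fun cnts c =>
        if PySem.List.pyGetD (pvW grid r) c ' ' = '@' then
          pvOffs.foldl (fun cnts d =>
            if 0 ≤ (r : Int) + d.1 ∧ (r : Int) + d.1 < PySem.List.len grid ∧ 0 ≤ c + d.2 ∧
                c + d.2 < PySem.List.len (PySem.List.pyGetD grid ((r : Int) + d.1) "").toList then
              PySem.List.pySetD cnts ((r : Int) + d.1)
                (PySem.List.pySetD (PySem.List.pyGetD cnts ((r : Int) + d.1) []) (c + d.2)
                  (PySem.List.pyGetD (PySem.List.pyGetD cnts ((r : Int) + d.1) []) (c + d.2) 0 + 1))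
            else cnts) cnts
        else cnts) cnts) i j
      = pvGetE cnts i j + ((List.range' b m).map (fun c => pvCell grid r c i j)).sum := by
  intro m
  induction m with
  | zero =>
    intro b hb cnts hs
    rw [PySem.List.pyRange_one_eq_nil (by omega)]
    exact ⟨hs, fun i j _ _ => by simp⟩
  | succ m ih =>
    intro b hb cnts hs
    have hblt : b < (pvW grid r).length := by omega
    rw [PySem.List.pyRange_one_cons (by exact_mod_cast hblt), List.foldl_cons]
    have hrowb : PySem.List.pyGetD (pvW grid r) ((b : Nat) : Int) ' ' = (pvW grid r).getD b ' ' :=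
      PySem.List.pyGetD_natCast _ _ _
    rw [show ((b : Int) + 1) = ((b + 1 : Nat) : Int) by push_cast; ring]
    by_cases hat : (pvW grid r).getD b ' ' = '@'
    · rw [if_pos (by rw [hrowb]; exact hat)]
      obtain ⟨hsF, hentF⟩ := pv_offs_fold grid (r : Int) (b : Int) pvOffs cnts hs
      obtain ⟨hsT, hentT⟩ := ih (b + 1) (by omega) _ hsF
      refine ⟨hsT, ?_⟩
      intro i j hi hj
      rw [hentT i j hi hj, hentF i j hi hj]
      have hS1 : pvS grid r b = 1 := by
        unfold pvS
        rw [if_pos]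
        rw [List.getElem?_eq_getElem hblt]
        rw [List.getD_eq_getElem?_getD, List.getElem?_eq_getElem hblt] at hat
        simpa using hat
      rw [List.range'_succ, List.map_cons, List.sum_cons]
      unfold pvCell pvNb8
      rw [hS1]
      ring
    · rw [if_neg (by rw [hrowb]; exact hat)]
      obtain ⟨hsT, hentT⟩ := ih (b + 1) (by omega) cnts hs
      refine ⟨hsT, ?_⟩
      intro i j hi hj
      rw [hentT i j hi hj]
      have hS0 : pvS grid r b = 0 := by
        unfold pvS
        rw [if_neg]
        rw [List.getElem?_eq_getElem hblt]
        rw [List.getD_eq_getElem?_getD, List.getElem?_eq_getElem hblt] at hat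
        intro hcon
        exact hat (by simpa using hcon)
      rw [List.range'_succ, List.map_cons, List.sum_cons]
      unfold pvCell
      rw [hS0]
      ring

-- the whole scatter pass
lemma pv_scatter (grid : List String) :
    ∀ (m a : Nat), a + m = grid.length →
    ∀ (cnts : List (List Int)), pvShape grid cnts →
    pvShape grid ((PySem.List.pyRange (a : Int) (PySem.List.len grid) 1).foldl (fun cnts r =>
        (PySem.List.pyRange 0 (PySem.List.len (PySem.List.pyGetD grid r "").toList) 1).foldl (fun cnts c =>
          if PySem.List.pyGetD (PySem.List.pyGetD grid r "").toList c ' ' = '@' then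
            pvOffs.foldl (fun cnts d =>
              if 0 ≤ r + d.1 ∧ r + d.1 < PySem.List.len grid ∧ 0 ≤ c + d.2 ∧
                  c + d.2 < PySem.List.len (PySem.List.pyGetD grid (r + d.1) "").toList then
                PySem.List.pySetD cnts (r + d.1)
                  (PySem.List.pySetD (PySem.List.pyGetD cnts (r + d.1) []) (c + d.2)
                    (PySem.List.pyGetD (PySem.List.pyGetD cnts (r + d.1) []) (c + d.2) 0 + 1))
              else cnts) cnts
          else cnts) cnts) cnts) ∧
    ∀ i j : Nat, i < grid.length → j < (pvW grid i).length →
      pvGetE ((PySem.List.pyRange (a : Int) (PySem.List.len grid) 1).foldl (fun cnts r =>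
        (PySem.List.pyRange 0 (PySem.List.len (PySem.List.pyGetD grid r "").toList) 1).foldl (fun cnts c =>
          if PySem.List.pyGetD (PySem.List.pyGetD grid r "").toList c ' ' = '@' then
            pvOffs.foldl (fun cnts d =>
              if 0 ≤ r + d.1 ∧ r + d.1 < PySem.List.len grid ∧ 0 ≤ c + d.2 ∧
                  c + d.2 < PySem.List.len (PySem.List.pyGetD grid (r + d.1) "").toList then
                PySem.List.pySetD cnts (r + d.1)
                  (PySem.List.pySetD (PySem.List.pyGetD cnts (r + d.1) []) (c + d.2)
                    (PySem.List.pyGetD (PySem.List.pyGetD cnts (r + d.1) []) (c + d.2) 0 + 1))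
              else cnts) cnts
          else cnts) cnts) cnts) i j
      = pvGetE cnts i j + ((List.range' a m).map (fun r => pvRowC grid r i j)).sum := by
  intro m
  induction m with
  | zero =>
    intro a ha cnts hs
    rw [PySem.List.pyRange_one_eq_nil (by rw [PySem.List.len_eq]; omega)]
    exact ⟨hs, fun i j _ _ => by simp⟩
  | succ m ih =>
    intro a ha cnts hs
    have halt : a < grid.length := by omega
    rw [PySem.List.pyRange_one_cons (by rw [PySem.List.len_eq]; exact_mod_cast halt), List.foldl_cons]
    have hrw : (PySem.List.pyGetD grid ((a : Nat) : Int) "").toList = pvW grid a := by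
      rw [PySem.List.pyGetD_natCast]; rfl
    rw [show ((a : Int) + 1) = ((a + 1 : Nat) : Int) by push_cast; ring]
    simp only [hrw, PySem.List.len_eq (pvW grid a)]
    have hinner := pv_scatter_row grid a halt (pvW grid a).length 0 (by omega) cnts hs
    rw [show (((0 : Nat)) : Int) = (0 : Int) from by norm_num] at hinner
    obtain ⟨hsF, hentF⟩ := hinner
    obtain ⟨hsT, hentT⟩ := ih (a + 1) (by omega) _ hsF
    refine ⟨hsT, ?_⟩
    intro i j hi hj
    rw [hentT i j hi hj, hentF i j hi hj]
    rw [List.range'_succ, List.map_cons, List.sum_cons]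
    unfold pvRowC
    rw [List.range_eq_range']
    ring

-- the counts table entry at a real cell
lemma pv_counts_entry (grid : List String) (i j : Nat) (hi : i < grid.length)
    (hj : j < (pvW grid i).length) :
    pvGetE ((PySem.List.pyRange 0 (PySem.List.len grid) 1).foldl (fun cnts r =>
        (PySem.List.pyRange 0 (PySem.List.len (PySem.List.pyGetD grid r "").toList) 1).foldl (fun cnts c =>
          if PySem.List.pyGetD (PySem.List.pyGetD grid r "").toList c ' ' = '@' then
            pvOffs.foldl (fun cnts d =>
              if 0 ≤ r + d.1 ∧ r + d.1 < PySem.List.len grid ∧ 0 ≤ c + d.2 ∧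
                  c + d.2 < PySem.List.len (PySem.List.pyGetD grid (r + d.1) "").toList then
                PySem.List.pySetD cnts (r + d.1)
                  (PySem.List.pySetD (PySem.List.pyGetD cnts (r + d.1) []) (c + d.2)
                    (PySem.List.pyGetD (PySem.List.pyGetD cnts (r + d.1) []) (c + d.2) 0 + 1))
              else cnts) cnts
          else cnts) cnts)
        (grid.map (fun row => List.replicate row.toList.length (0 : Int)))) i j
      = pvTot grid i j := by
  have hs0 : pvShape grid (grid.map (fun row => List.replicate row.toList.length (0 : Int))) := by
    constructor
    · simp
    · intro k
      by_cases hk : k < grid.length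
      · rw [List.getD_eq_getElem?_getD, List.getElem?_map, List.getElem?_eq_getElem hk]
        simp [pvW, List.getD_eq_getElem?_getD, List.getElem?_eq_getElem hk]
      · rw [List.getD_eq_default _ _ (by simpa using not_lt.mp hk)]
        rw [show pvW grid k = [] from by
          unfold pvW; rw [List.getD_eq_default _ _ (not_lt.mp hk)]; rfl]
        rfl
  have h0 : pvGetE (grid.map (fun row => List.replicate row.toList.length (0 : Int))) i j = 0 := by
    unfold pvGetE
    rw [show (grid.map (fun row => List.replicate row.toList.length (0 : Int))).getD i []
        = List.replicate (grid[i]'hi).toList.length (0 : Int) from by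
      rw [List.getD_eq_getElem?_getD, List.getElem?_map, List.getElem?_eq_getElem hi]; rfl]
    rw [List.getD_eq_getElem?_getD, List.getElem?_replicate]
    split_ifs <;> rfl
  obtain ⟨_, hent⟩ := pv_scatter grid grid.length 0 (by omega) _ hs0
  rw [show (((0 : Nat)) : Int) = (0 : Int) from by norm_num] at hent
  rw [hent i j hi hj, h0]
  unfold pvTot
  rw [List.range_eq_range']
  ring

-- ===== the combinatorial identity: scatter total = gather block count =====

lemma pvS_zero_of_ge (grid : List String) (r c : Nat) (h : (pvW grid r).length ≤ c) :
    pvS grid r c = 0 := by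
  unfold pvS
  rw [if_neg]
  intro hc
  exact absurd ((List.getElem?_eq_some_iff.mp hc).1) (by omega)

lemma pvRowS_zero_of_ge (grid : List String) (j k : Nat) (h : grid.length ≤ k) :
    pvRowS grid j k = 0 := by
  have hW : pvW grid k = [] := by
    unfold pvW; rw [List.getD_eq_default _ _ h]; rfl
  have hz : ∀ c, pvS grid k c = 0 := fun c => pvS_zero_of_ge _ _ _ (by simp [hW])
  unfold pvRowS
  simp only [hz]
  split_ifs <;> ring

-- a pinned sum: only the one index equal to t contributes
lemma pv_pin (n : Nat) (f : Nat → Int) (t : Int) (P : Nat → Prop) [DecidablePred P]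
    (hP : ∀ c : Nat, P c ↔ (c : Int) = t) :
    (∑ c ∈ Finset.range n, f c * (if P c then (1:Int) else 0))
      = if 0 ≤ t ∧ t < (n : Int) then f t.toNat else 0 := by
  induction n with
  | zero =>
    rw [Finset.range_zero, Finset.sum_empty, if_neg]
    push_cast
    omega
  | succ n ih =>
    rw [Finset.sum_range_succ, ih]
    by_cases hn : (n : Int) = t
    · rw [if_pos ((hP n).mpr hn), if_neg (by omega), if_pos (by constructor <;> push_cast <;> omega)]
      rw [← hn, Int.toNat_natCast]
      ring
    · rw [if_neg (fun h => hn ((hP n).mp h)), mul_zero, add_zero]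
      rw [if_congr (show (0 ≤ t ∧ t < ((n:Nat) : Int)) ↔ (0 ≤ t ∧ t < (((n+1:Nat)) : Int)) from by
        push_cast; omega) rfl rfl]

lemma pv_lsum (n : Nat) (f : Nat → Int) :
    ((List.range n).map f).sum = ∑ c ∈ Finset.range n, f c := by
  induction n with
  | zero => simp
  | succ n ih => rw [List.range_succ, Finset.sum_range_succ, List.map_append, List.sum_append, ih]; simp

-- indicator algebra for the 8-offset sum
def pvR (r i : Nat) : Int :=
  (if (r:Int) + -1 = (i:Int) then 1 else 0) + (if (r:Int) + 0 = (i:Int) then 1 else 0)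
    + (if (r:Int) + 1 = (i:Int) then 1 else 0)

lemma pv_ite_and (P Q : Prop) [Decidable P] [Decidable Q] :
    (if P ∧ Q then (1:Int) else 0) = (if P then (1:Int) else 0) * (if Q then (1:Int) else 0) := by
  by_cases hp : P <;> by_cases hq : Q <;> simp [hp, hq]

lemma pv_nb8_eq (r c i j : Nat) :
    pvNb8 (r : Int) (c : Int) i j
      = pvR r i * pvR c j
        - (if (r:Int) + 0 = (i:Int) then (1:Int) else 0) * (if (c:Int) + 0 = (j:Int) then (1:Int) else 0) := by
  simp only [pvNb8, pvOffs, List.map_cons, List.map_nil, List.sum_cons, List.sum_nil, pv_ite_and, pvR]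
  split_ifs <;> norm_num

-- pinned sums against a zero-padded function
lemma pv_pinZ (n : Nat) (f : Nat → Int) (hz : ∀ k, n ≤ k → f k = 0) (t : Int)
    (P : Nat → Prop) [DecidablePred P] (hP : ∀ c : Nat, P c ↔ (c : Int) = t) :
    (∑ c ∈ Finset.range n, f c * (if P c then (1:Int) else 0))
      = if 0 ≤ t then f t.toNat else 0 := by
  rw [pv_pin n f t P hP]
  by_cases h0 : 0 ≤ t
  · by_cases h1 : t < (n : Int)
    · rw [if_pos ⟨h0, h1⟩, if_pos h0]
    · rw [if_neg (fun h => h1 h.2), if_pos h0, hz _ (by omega)]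
  · rw [if_neg (fun h => h0 h.1), if_neg h0]

lemma pvS_zero_row_of_ge (grid : List String) (r c : Nat) (h : grid.length ≤ r) :
    pvS grid r c = 0 := by
  apply pvS_zero_of_ge
  rw [show pvW grid r = [] from by unfold pvW; rw [List.getD_eq_default _ _ h]; rfl]
  simp

-- the three pins of a pvR factor, against a zero-padded f
lemma pv_triple (n : Nat) (f : Nat → Int) (hz : ∀ k, n ≤ k → f k = 0) (j : Nat) :
    (∑ c ∈ Finset.range n, f c * pvR c j)
      = (if j = 0 then 0 else f (j - 1)) + f j + f (j + 1) := by
  have hsplit : ∀ c ∈ Finset.range n, f c * pvR c j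
      = f c * (if (c:Int) + -1 = (j:Int) then (1:Int) else 0)
        + (f c * (if (c:Int) + 0 = (j:Int) then (1:Int) else 0)
          + f c * (if (c:Int) + 1 = (j:Int) then (1:Int) else 0)) := by
    intro c _
    unfold pvR
    ring
  rw [Finset.sum_congr rfl hsplit, Finset.sum_add_distrib, Finset.sum_add_distrib]
  rw [pv_pinZ n f hz ((j:Int) + 1) _ (fun c => by omega),
      pv_pinZ n f hz ((j:Int)) _ (fun c => by omega),
      pv_pinZ n f hz ((j:Int) - 1) _ (fun c => by omega)]
  rw [if_pos (show (0:Int) ≤ (j:Int) + 1 from by omega),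
      if_pos (show (0:Int) ≤ (j:Int) from by omega)]
  rw [show ((j:Int) + 1).toNat = j + 1 from by omega, show ((j:Int)).toNat = j from by omega]
  by_cases hj : j = 0
  · rw [if_neg (show ¬ (0:Int) ≤ (j:Int) - 1 from by omega), if_pos hj]
    ring
  · rw [if_pos (show (0:Int) ≤ (j:Int) - 1 from by omega), if_neg hj,
        show ((j:Int) - 1).toNat = j - 1 from by omega]
    ring

lemma pv_rowC_eq (grid : List String) (r i j : Nat) :
    pvRowC grid r i j
      = pvR r i * pvRowS grid j r - (if (r:Int) + 0 = (i:Int) then (1:Int) else 0) * pvS grid r j := by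
  unfold pvRowC
  rw [pv_lsum]
  have h1 : ∀ c ∈ Finset.range (pvW grid r).length, pvCell grid r c i j
      = pvR r i * (pvS grid r c * pvR c j)
        - (if (r:Int) + 0 = (i:Int) then (1:Int) else 0)
            * (pvS grid r c * (if (c:Int) + 0 = (j:Int) then (1:Int) else 0)) := by
    intro c _
    unfold pvCell
    rw [pv_nb8_eq]
    ring
  rw [Finset.sum_congr rfl h1, Finset.sum_sub_distrib, ← Finset.mul_sum, ← Finset.mul_sum]
  rw [pv_triple (pvW grid r).length (pvS grid r) (fun k hk => pvS_zero_of_ge grid r k hk) j]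
  rw [pv_pinZ (pvW grid r).length (pvS grid r) (fun k hk => pvS_zero_of_ge grid r k hk)
    ((j:Int)) _ (fun c => by omega)]
  rw [if_pos (show (0:Int) ≤ (j:Int) from by omega), show ((j:Int)).toNat = j from by omega]
  unfold pvRowS
  ring

lemma pv_tot_eq (grid : List String) (i j : Nat) :
    pvTot grid i j = pvBlock grid i j - pvS grid i j := by
  unfold pvTot
  rw [pv_lsum]
  have h1 : ∀ r ∈ Finset.range grid.length, pvRowC grid r i j
      = pvRowS grid j r * pvR r i
        - (pvS grid r j) * (if (r:Int) + 0 = (i:Int) then (1:Int) else 0) := by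
    intro r _
    rw [pv_rowC_eq]
    ring
  rw [Finset.sum_congr rfl h1, Finset.sum_sub_distrib]
  rw [pv_triple grid.length (fun k => pvRowS grid j k) (fun k hk => pvRowS_zero_of_ge grid j k hk) i]
  rw [pv_pinZ grid.length (fun k => pvS grid k j) (fun k hk => pvS_zero_row_of_ge grid k j hk)
    ((i:Int)) _ (fun r => by omega)]
  rw [if_pos (show (0:Int) ≤ (i:Int) from by omega), show ((i:Int)).toNat = i from by omega]
  unfold pvBlock
  ring

-- ===== the second pass =====

lemma pv_pass2_inner (grid : List String) (cnts : List (List Int)) (r : Nat)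
    (hr : r < grid.length)
    (hcr : ∀ j : Nat, j < (pvW grid r).length →
      (cnts.getD r []).getD j 0 = pvBlock grid r j - pvS grid r j) :
    ∀ (m b : Nat), b + m = (pvW grid r).length →
    ∀ (acc : List Char) (z : Int),
    (PySem.List.pyRange (b : Int) ((pvW grid r).length : Int) 1).foldl
      (fun (p : List Char × Int) c =>
        if PySem.List.pyGetD (pvW grid r) c ' ' = '@' ∧
            PySem.List.pyGetD (PySem.List.pyGetD cnts (r : Int) []) c 0 < 4 then
          (p.1 ++ ['x'], p.2 + 1)
        else (p.1 ++ [PySem.List.pyGetD (pvW grid r) c ' '], p.2)) (acc, z)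
    = (acc ++ (List.range' b m).map (fun q => if pvDecB grid r q then 'x' else (pvW grid r).getD q ' '),
       z + ((List.range' b m).countP (pvDecB grid r) : Int)) := by
  intro m
  induction m with
  | zero =>
    intro b hb acc z
    rw [PySem.List.pyRange_one_eq_nil (by omega)]
    simp
  | succ m ih =>
    intro b hb acc z
    have hblt : b < (pvW grid r).length := by omega
    rw [PySem.List.pyRange_one_cons (by exact_mod_cast hblt), List.foldl_cons]
    have hrowb : PySem.List.pyGetD (pvW grid r) ((b : Nat) : Int) ' ' = (pvW grid r).getD b ' ' :=
      PySem.List.pyGetD_natCast _ _ _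
    have hcnt : PySem.List.pyGetD (PySem.List.pyGetD cnts ((r : Nat) : Int) []) ((b : Nat) : Int) 0
        = pvBlock grid r b - pvS grid r b := by
      rw [PySem.List.pyGetD_natCast, PySem.List.pyGetD_natCast]
      exact hcr b hblt
    rw [show ((b : Int) + 1) = ((b + 1 : Nat) : Int) by push_cast; ring]
    by_cases hat : (pvW grid r).getD b ' ' = '@'
    · have hS1 : pvS grid r b = 1 := by
        unfold pvS
        rw [if_pos]
        rw [List.getElem?_eq_getElem hblt]
        rw [List.getD_eq_getElem?_getD, List.getElem?_eq_getElem hblt] at hat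
        simpa using hat
      by_cases hlt : pvBlock grid r b - 1 < 4
      · have hdec : pvDecB grid r b = true := by
          unfold pvDecB; exact decide_eq_true ⟨hat, hlt⟩
        rw [if_pos (by rw [hrowb, hcnt, hS1]; exact ⟨hat, by omega⟩)]
        dsimp only
        rw [ih (b + 1) (by omega) (acc ++ ['x']) (z + 1)]
        rw [List.range'_succ, List.map_cons, List.countP_cons]
        simp [hdec]
        push_cast
        ring
      · have hdec : pvDecB grid r b = false := by
          unfold pvDecB; exact decide_eq_false (fun h => hlt h.2)
        rw [if_neg (by rw [hrowb, hcnt, hS1]; rintro ⟨_, h⟩; omega)]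
        dsimp only
        rw [hrowb]
        rw [ih (b + 1) (by omega) (acc ++ [(pvW grid r).getD b ' ']) z]
        rw [List.range'_succ, List.map_cons, List.countP_cons]
        simp [hdec, hrowb]
    · have hdec : pvDecB grid r b = false := by
        unfold pvDecB; exact decide_eq_false (fun h => hat h.1)
      rw [if_neg (by rw [hrowb]; rintro ⟨h, _⟩; exact hat h)]
      dsimp only
      rw [hrowb]
      rw [ih (b + 1) (by omega) (acc ++ [(pvW grid r).getD b ' ']) z]
      rw [List.range'_succ, List.map_cons, List.countP_cons]
      simp [hdec, hrowb]

lemma pv_pass2_outer (grid : List String) (cnts : List (List Int))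
    (hc : ∀ i j : Nat, i < grid.length → j < (pvW grid i).length →
      (cnts.getD i []).getD j 0 = pvBlock grid i j - pvS grid i j) :
    ∀ (m a : Nat), a + m = grid.length →
    ∀ (acc : List String) (z : Int),
    (PySem.List.pyRange (a : Int) (PySem.List.len grid) 1).foldl
      (fun (st : List String × Int) r =>
        (st.1 ++ [String.ofList ((PySem.List.pyRange 0 (PySem.List.len (PySem.List.pyGetD grid r "").toList) 1).foldl
            (fun (p : List Char × Int) c =>
              if PySem.List.pyGetD (PySem.List.pyGetD grid r "").toList c ' ' = '@' ∧
                  PySem.List.pyGetD (PySem.List.pyGetD cnts r []) c 0 < 4 then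
                (p.1 ++ ['x'], p.2 + 1)
              else (p.1 ++ [PySem.List.pyGetD (PySem.List.pyGetD grid r "").toList c ' '], p.2))
            (([] : List Char), st.2)).1],
         ((PySem.List.pyRange 0 (PySem.List.len (PySem.List.pyGetD grid r "").toList) 1).foldl
            (fun (p : List Char × Int) c =>
              if PySem.List.pyGetD (PySem.List.pyGetD grid r "").toList c ' ' = '@' ∧
                  PySem.List.pyGetD (PySem.List.pyGetD cnts r []) c 0 < 4 then
                (p.1 ++ ['x'], p.2 + 1)
              else (p.1 ++ [PySem.List.pyGetD (PySem.List.pyGetD grid r "").toList c ' '], p.2))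
            (([] : List Char), st.2)).2)) (acc, z)
    = (acc ++ (List.range' a m).map (fun k => String.ofList (pvRowRef grid (pvDecB grid) k)),
       z + ((List.range' a m).map (pvCnt grid (pvDecB grid))).sum) := by
  intro m
  induction m with
  | zero =>
    intro a ha acc z
    rw [PySem.List.pyRange_one_eq_nil (by rw [PySem.List.len_eq]; omega)]
    simp
  | succ m ih =>
    intro a ha acc z
    have halt : a < grid.length := by omega
    rw [PySem.List.pyRange_one_cons (by rw [PySem.List.len_eq]; exact_mod_cast halt), List.foldl_cons]
    have hrw : (PySem.List.pyGetD grid ((a : Nat) : Int) "").toList = pvW grid a := by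
      rw [PySem.List.pyGetD_natCast]; rfl
    simp only [hrw, PySem.List.len_eq (pvW grid a)]
    have hin := pv_pass2_inner grid cnts a halt (hc a · halt ·) (pvW grid a).length 0 (by omega)
      ([] : List Char) z
    rw [show (((0 : Nat)) : Int) = (0 : Int) from by norm_num] at hin
    rw [hin]
    dsimp only
    rw [show ((a : Int) + 1) = ((a + 1 : Nat) : Int) by push_cast; ring]
    rw [ih (a + 1) (by omega) _ _]
    rw [List.range'_succ]
    simp only [List.map_cons, List.sum_cons, List.nil_append, Prod.mk.injEq]
    constructor
    · rw [show pvRowRef grid (pvDecB grid) a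
          = (List.range (pvW grid a).length).map
              (fun q => if pvDecB grid a q then 'x' else (pvW grid a).getD q ' ') from rfl,
        List.range_eq_range']
      simp
    · rw [show pvCnt grid (pvDecB grid) a
          = ((List.countP (pvDecB grid a) (List.range (pvW grid a).length) : Nat) : Int) from rfl,
        List.range_eq_range']
      ring

lemma pv_pass2_full (grid : List String) (cnts : List (List Int))
    (hc : ∀ i j : Nat, i < grid.length → j < (pvW grid i).length →
      (cnts.getD i []).getD j 0 = pvBlock grid i j - pvS grid i j) :
    (PySem.List.pyRange 0 (PySem.List.len grid) 1).foldl
      (fun (st : List String × Int) r =>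
        (st.1 ++ [String.ofList ((PySem.List.pyRange 0 (PySem.List.len (PySem.List.pyGetD grid r "").toList) 1).foldl
            (fun (p : List Char × Int) c =>
              if PySem.List.pyGetD (PySem.List.pyGetD grid r "").toList c ' ' = '@' ∧
                  PySem.List.pyGetD (PySem.List.pyGetD cnts r []) c 0 < 4 then
                (p.1 ++ ['x'], p.2 + 1)
              else (p.1 ++ [PySem.List.pyGetD (PySem.List.pyGetD grid r "").toList c ' '], p.2))
            (([] : List Char), st.2)).1],
         ((PySem.List.pyRange 0 (PySem.List.len (PySem.List.pyGetD grid r "").toList) 1).foldl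
            (fun (p : List Char × Int) c =>
              if PySem.List.pyGetD (PySem.List.pyGetD grid r "").toList c ' ' = '@' ∧
                  PySem.List.pyGetD (PySem.List.pyGetD cnts r []) c 0 < 4 then
                (p.1 ++ ['x'], p.2 + 1)
              else (p.1 ++ [PySem.List.pyGetD (PySem.List.pyGetD grid r "").toList c ' '], p.2))
            (([] : List Char), st.2)).2)) (([] : List String), 0)
    = pvRef grid (pvDecB grid) := by
  have h := pv_pass2_outer grid cnts hc grid.length 0 (by omega) ([] : List String) 0
  rw [show (((0 : Nat)) : Int) = (0 : Int) from by norm_num] at h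
  rw [h]
  unfold pvRef
  rw [← List.range_eq_range']
  simp

theorem pvB_eq (grid : List String) :
    remove_rolls_alt grid = pvRef grid (pvDecB grid) := by
  simp only [remove_rolls_alt]
  exact pv_pass2_full grid _
    (fun i j hi hj => (pv_counts_entry grid i j hi hj).trans (pv_tot_eq grid i j))

-- ===== VERDICT (by name: the statement is the Claim_ definition above) =====
theorem remove_rolls_spec : Claim_equal_remove_rolls := by
  intro grid _ hpre
  unfold Spec_remove_rolls
  rw [pvA_eq, pvB_eq]
  unfold pvRef
  have hdec : ∀ i ∈ List.range grid.length, ∀ j ∈ List.range (pvW grid i).length,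
      pvDecA grid i j = pvDecB grid i j := by
    intro i hi j hj
    exact pv_dec_eq hpre (List.mem_range.mp hi) (List.mem_range.mp hj)
  have h1 : ∀ i ∈ List.range grid.length,
      pvRowRef grid (pvDecA grid) i = pvRowRef grid (pvDecB grid) i := by
    intro i hi0; unfold pvRowRef
    apply List.map_congr_left; intro j hj0
    rw [hdec i hi0 j hj0]
  have h2 : ∀ i ∈ List.range grid.length,
      pvCnt grid (pvDecA grid) i = pvCnt grid (pvDecB grid) i := by
    intro i hi0; unfold pvCnt
    congr 1
    apply List.countP_congr
    intro j hj0; rw [hdec i hi0 j hj0]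
  simp only [Prod.mk.injEq]
  exact ⟨List.map_congr_left (fun i hi0 => by rw [h1 i hi0]),
    by rw [List.map_congr_left h2]⟩
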